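-- pv_equiv track=rewrite | github.com/git-of-neo/python | optimisation.py | enough
-- ===== SOURCE A (Python) =====
-- def enough(cans,chosen):
--     carb=[]
--     protein=[]
--     fat=[]
--     #add the value of nutrition to their respective list
--     for i in chosen:
--         carb.append(cans[i][0])
--         protein.append(cans[i][1])
--         fat.append(cans[i][2])
--     #requirements to achieve
--     req1=sum(carb)>=500
--     req2=sum(protein)>=250
--     req3=sum(fat)>=90
--     return (req1 and req2 and req3)
-- ===== SOURCE B (Python) =====
-- def enough(cans, chosen):
--     # Recursive countdown: subtract each chosen can's nutrients from the
--     # remaining requirements; met iff nothing remains to be covered.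
--     def covered(idx, need_carb, need_protein, need_fat):
--         if idx == len(chosen):
--             return need_carb <= 0 and need_protein <= 0 and need_fat <= 0
--         can = cans[chosen[idx]]
--         return covered(idx + 1, need_carb - can[0], need_protein - can[1], need_fat - can[2])
--     return covered(0, 500, 250, 90)
-- ===== Notes on version B (the rewrite author's own statement) =====
-- stated objective: alternative
-- what changed: Replaces A's build-three-lists-then-sum-each with a recursive countdown over remaining requirements: it subtracts each chosen can's nutrients from (500,250,90) and at the end checks all remainders are <= 0; correct since sum(x) >= t iff t - sum(x) <= 0.
import Mathlib
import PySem

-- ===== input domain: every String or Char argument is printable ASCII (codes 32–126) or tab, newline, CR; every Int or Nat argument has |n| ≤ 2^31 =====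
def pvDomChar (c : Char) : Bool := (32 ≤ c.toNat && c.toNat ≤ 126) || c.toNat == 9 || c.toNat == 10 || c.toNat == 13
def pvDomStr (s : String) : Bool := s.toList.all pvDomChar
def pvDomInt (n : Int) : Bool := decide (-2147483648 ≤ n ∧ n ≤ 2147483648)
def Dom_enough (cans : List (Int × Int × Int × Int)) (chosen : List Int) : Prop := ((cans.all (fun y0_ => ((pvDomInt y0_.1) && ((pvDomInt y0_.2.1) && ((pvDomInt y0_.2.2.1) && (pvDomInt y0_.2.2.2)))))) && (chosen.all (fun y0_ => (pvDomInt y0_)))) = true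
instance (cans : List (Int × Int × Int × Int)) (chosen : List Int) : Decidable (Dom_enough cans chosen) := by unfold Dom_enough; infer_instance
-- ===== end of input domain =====

-- ===== PORT A =====
-- cans arrives as a dict int -> (carb, protein, fat): an association list Int × (Int × Int × Int);
-- cans[i] is a dict lookup (KeyError, i.e. none, excluded by Pre_; getD's default is never the value claimed).
-- B replaces A's three-lists-then-sum with a recursive countdown over remaining requirements (objective: alternative).
def enough (cans : List (Int × Int × Int × Int)) (chosen : List Int) : Bool :=
  let st := chosen.foldl
    (fun (acc : List Int × List Int × List Int) i =>
      let can := PySem.Dict.getD (PySem.Dict.mk cans) i (0, 0, 0)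
      (acc.1 ++ [can.1], acc.2.1 ++ [can.2.1], acc.2.2 ++ [can.2.2]))
    ([], [], [])
  decide (st.1.sum ≥ 500) && decide (st.2.1.sum ≥ 250) && decide (st.2.2.sum ≥ 90)

-- ===== PORT B =====
-- recursive helper 'covered' of Source B (index recursion over chosen ported as structural recursion on the remaining suffix)
def enoughAltCovered (cans : List (Int × Int × Int × Int)) : List Int → Int → Int → Int → Bool
  | [], nc, np, nf => decide (nc ≤ 0) && decide (np ≤ 0) && decide (nf ≤ 0)
  | i :: rest, nc, np, nf =>
      let can := PySem.Dict.getD (PySem.Dict.mk cans) i (0, 0, 0)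
      enoughAltCovered cans rest (nc - can.1) (np - can.2.1) (nf - can.2.2)

def enough_alt (cans : List (Int × Int × Int × Int)) (chosen : List Int) : Bool :=
  enoughAltCovered cans chosen 500 250 90

-- ===== PRECONDITION & SPEC =====
-- Pre_ excludes exactly the inputs where cans[i] raises KeyError in A (B looks keys up identically and raises there too).
def Pre_enough (cans : List (Int × Int × Int × Int)) (chosen : List Int) : Prop :=
  ∀ i ∈ chosen, i ∈ cans.map Prod.fst
instance (cans : List (Int × Int × Int × Int)) (chosen : List Int) : Decidable (Pre_enough cans chosen) := by unfold Pre_enough; infer_instance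
def pvWitness_enough : (List (Int × Int × Int × Int)) × List Int := ([(0, 600, 300, 100)], [0, 0])
def Spec_enough (cans : List (Int × Int × Int × Int)) (chosen : List Int) (out : Bool) : Prop := out = enough_alt cans chosen
instance (cans : List (Int × Int × Int × Int)) (chosen : List Int) (out : Bool) : Decidable (Spec_enough cans chosen out) := by unfold Spec_enough; infer_instance

-- ===== CLAIM (what is proved, stated in full; the proofs are below) =====
def Claim_equal_enough : Prop := ∀ (cans : List (Int × Int × Int × Int)) (chosen : List Int), Dom_enough cans chosen → Pre_enough cans chosen → Spec_enough cans chosen (enough cans chosen)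

-- ===== LEMMAS AND PROOFS =====
-- The sums of A's three accumulated lists, expressed as component sums over chosen.
theorem enough_fold_sums (cans : List (Int × Int × Int × Int)) :
    ∀ (chosen : List Int) (a b c : List Int),
      (let st := chosen.foldl
        (fun (acc : List Int × List Int × List Int) i =>
          let can := PySem.Dict.getD (PySem.Dict.mk cans) i (0, 0, 0)
          (acc.1 ++ [can.1], acc.2.1 ++ [can.2.1], acc.2.2 ++ [can.2.2]))
        (a, b, c)
       (st.1.sum, st.2.1.sum, st.2.2.sum)) =
      (a.sum + (chosen.map (fun i => (PySem.Dict.getD (PySem.Dict.mk cans) i (0, 0, 0)).1)).sum,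
       b.sum + (chosen.map (fun i => (PySem.Dict.getD (PySem.Dict.mk cans) i (0, 0, 0)).2.1)).sum,
       c.sum + (chosen.map (fun i => (PySem.Dict.getD (PySem.Dict.mk cans) i (0, 0, 0)).2.2)).sum) := by
  intro chosen
  induction chosen with
  | nil => intro a b c; simp
  | cons i rest ih =>
      intro a b c
      have h := ih (a ++ [(PySem.Dict.getD (PySem.Dict.mk cans) i (0, 0, 0)).1])
                   (b ++ [(PySem.Dict.getD (PySem.Dict.mk cans) i (0, 0, 0)).2.1])
                   (c ++ [(PySem.Dict.getD (PySem.Dict.mk cans) i (0, 0, 0)).2.2])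
      simp only [List.foldl_cons, List.map_cons, List.sum_cons, List.sum_append,
        List.sum_cons, List.sum_nil] at h ⊢
      rw [h]; simp [Prod.ext_iff]; refine ⟨by ring, by ring, by ring⟩

-- B's countdown, expressed against the same component sums.
theorem enough_covered_eq (cans : List (Int × Int × Int × Int)) :
    ∀ (chosen : List Int) (nc np nf : Int),
      enoughAltCovered cans chosen nc np nf =
      (decide (nc - (chosen.map (fun i => (PySem.Dict.getD (PySem.Dict.mk cans) i (0, 0, 0)).1)).sum ≤ 0) &&
       decide (np - (chosen.map (fun i => (PySem.Dict.getD (PySem.Dict.mk cans) i (0, 0, 0)).2.1)).sum ≤ 0) &&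
       decide (nf - (chosen.map (fun i => (PySem.Dict.getD (PySem.Dict.mk cans) i (0, 0, 0)).2.2)).sum ≤ 0)) := by
  intro chosen
  induction chosen with
  | nil => intro nc np nf; simp [enoughAltCovered]
  | cons i rest ih =>
      intro nc np nf
      simp [enoughAltCovered, ih, sub_sub]

-- ===== VERDICT (by name: the statement is the Claim_ definition above) =====
theorem enough_spec : Claim_equal_enough := by
  intro cans chosen _ _
  unfold Spec_enough enough enough_alt
  have hA := enough_fold_sums cans chosen [] [] []
  simp only [List.sum_nil, zero_add] at hA
  have h1 := congrArg Prod.fst hA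
  have h2 := congrArg (fun p => p.2.1) hA
  have h3 := congrArg (fun p => p.2.2) hA
  simp only [] at h1 h2 h3 ⊢
  have e : ∀ (t S : Int), decide (S ≥ t) = decide (t - S ≤ 0) := by
    intro t S; rw [decide_eq_decide]; omega
  rw [h1, h2, h3, enough_covered_eq, e, e, e]
  simp
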